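-- pv_equiv track=rewrite | github.com/poflygogo/randomshit | 01zerojudge/06 未解之謎/c658 小新的提款卡密碼/v1-1.py | is_possible_square
-- ===== SOURCE A (Python) =====
-- def is_possible_square(n: int) -> bool:
--     """判斷該數的每一位數字重新排列組合後是否有可能成為完全平方數"""
--     def set_interection(n: str):
--         return bool({'1', '4', '5', '6', '9'}.intersection(set(n)))
--
--     def digit_sum(n: int) -> bool:
--         while n > 9:
--             n = sum(int(i) for i in str(n))
--         return n in (1, 4, 7, 9)
--
--     def mod_3_and_4(n: int) -> bool:
--         return (n % 3 in (0, 1)) or (n % 4 in (0, 1))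
--
--     return set_interection(str(n)) or digit_sum(n) or mod_3_and_4(n)
-- ===== SOURCE B (Python) =====
-- def is_possible_square(n: int) -> bool:
--     """判斷該數的每一位數字重新排列組合後是否有可能成為完全平方數"""
--     if any(c in '14569' for c in str(n)):
--         return True
--     if n >= 1 and 1 + (n - 1) % 9 in (1, 4, 7, 9):
--         return True
--     return n % 3 < 2 or n % 4 < 2
-- ===== Notes on version B (the rewrite author's own statement) =====
-- stated objective: simpler
-- what changed: The iterative repeated digit-sum loop (re-stringifying the number each round) is replaced by the closed-form digital root 1 + (n-1) % 9 guarded by n >= 1, and the set-intersection and tuple-membership tests become direct comparisons; no loop over successive digit sums remains.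
import Mathlib
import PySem

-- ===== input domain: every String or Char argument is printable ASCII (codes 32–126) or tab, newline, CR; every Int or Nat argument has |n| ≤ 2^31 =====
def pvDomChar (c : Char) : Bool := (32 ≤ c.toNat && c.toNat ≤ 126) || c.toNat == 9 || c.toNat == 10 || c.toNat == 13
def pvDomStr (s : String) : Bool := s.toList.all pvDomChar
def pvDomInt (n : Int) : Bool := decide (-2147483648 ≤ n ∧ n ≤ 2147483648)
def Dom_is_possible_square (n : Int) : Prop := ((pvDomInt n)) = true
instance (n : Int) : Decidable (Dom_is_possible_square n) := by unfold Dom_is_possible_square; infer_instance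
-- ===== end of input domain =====

-- B replaces A's iterative repeated digit-sum loop by the closed-form digital root 1 + (n-1) % 9
-- (guarded by n >= 1) and inlines the other two tests as direct comparisons (objective: simpler).

-- ===== PORT A =====
-- set_interection: bool({'1','4','5','6','9'}.intersection(set(n)))
def pvSetInterection (s : String) : Bool :=
  !(PySem.Set.inter (PySem.Set.ofList ['1', '4', '5', '6', '9'])
      (PySem.Set.ofList s.toList)).isEmpty

-- one round of the while-loop body: n = sum(int(i) for i in str(n))
-- (int(i) via PySem.Int.ofChars?; the default 0 is never used when the loop runs, since n > 9 has only digit chars)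
def pvDigitSumStep (m : Int) : Int :=
  ((PySem.Int.toChars m).map (fun c => (PySem.Int.ofChars? [c]).getD 0)).sum

-- the while-loop, with fuel; fuel m.toNat is enough because for m > 9 the digit sum is positive and strictly smaller
def pvDigitSumLoop : Nat → Int → Int
  | 0, m => m
  | f + 1, m => if m > 9 then pvDigitSumLoop f (pvDigitSumStep m) else m

-- digit_sum: while n > 9: n = sum(int(i) for i in str(n)); return n in (1, 4, 7, 9)
def pvDigitSum (n : Int) : Bool :=
  let r := pvDigitSumLoop n.toNat n
  r == 1 || r == 4 || r == 7 || r == 9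

-- mod_3_and_4: (n % 3 in (0, 1)) or (n % 4 in (0, 1))
def pvMod34 (n : Int) : Bool :=
  (PySem.Int.mod n 3 == 0 || PySem.Int.mod n 3 == 1) ||
    (PySem.Int.mod n 4 == 0 || PySem.Int.mod n 4 == 1)

def is_possible_square (n : Int) : Bool :=
  pvSetInterection (PySem.Int.toStr n) || pvDigitSum n || pvMod34 n

-- ===== PORT B =====
def is_possible_square_alt (n : Int) : Bool :=
  if (PySem.Int.toStr n).toList.any (fun c => ['1', '4', '5', '6', '9'].contains c) then
    true
  else if decide (1 ≤ n) &&
      (let dr := 1 + PySem.Int.mod (n - 1) 9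
       dr == 1 || dr == 4 || dr == 7 || dr == 9) then
    true
  else
    decide (PySem.Int.mod n 3 < 2) || decide (PySem.Int.mod n 4 < 2)

-- ===== PRECONDITION & SPEC =====
def Spec_is_possible_square (n : Int) (out : Bool) : Prop := out = is_possible_square_alt n
instance (n : Int) (out : Bool) : Decidable (Spec_is_possible_square n out) := by unfold Spec_is_possible_square; infer_instance

-- ===== CLAIM (what is proved, stated in full; the proofs are below) =====
def Claim_equal_is_possible_square : Prop := ∀ (n : Int), Dom_is_possible_square n → Spec_is_possible_square n (is_possible_square n)

-- ===== LEMMAS AND PROOFS =====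

-- arithmetic digit sum (proof device only; the ports never use it)
def pvSumDigits : Nat → Nat
  | 0 => 0
  | m + 1 => (m + 1) % 10 + pvSumDigits ((m + 1) / 10)
  decreasing_by exact Nat.div_lt_self (Nat.succ_pos m) (by norm_num)

theorem pvSumDigits_eq (m : Nat) :
    pvSumDigits m = if m = 0 then 0 else m % 10 + pvSumDigits (m / 10) := by
  cases m with
  | zero => simp [pvSumDigits]
  | succ k => simp [pvSumDigits]

theorem pvSumDigits_le (m : Nat) : pvSumDigits m ≤ m := by
  induction m using Nat.strong_induction_on with
  | _ m ih =>
    rw [pvSumDigits_eq]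
    by_cases h : m = 0
    · simp [h]
    · have hd : m / 10 < m := Nat.div_lt_self (Nat.pos_of_ne_zero h) (by norm_num)
      have := ih (m / 10) hd
      simp only [h, if_false]
      omega

theorem pvSumDigits_lt (m : Nat) (h : 10 ≤ m) : pvSumDigits m < m := by
  rw [pvSumDigits_eq]
  have hd : m / 10 < m := Nat.div_lt_self (by omega) (by norm_num)
  have := pvSumDigits_le (m / 10)
  simp only [show m ≠ 0 by omega, if_false]
  omega

theorem pvSumDigits_pos (m : Nat) (h : 1 ≤ m) : 1 ≤ pvSumDigits m := by
  induction m using Nat.strong_induction_on with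
  | _ m ih =>
    rw [pvSumDigits_eq]
    simp only [show m ≠ 0 by omega, if_false]
    by_cases h10 : m % 10 = 0
    · have hd : m / 10 < m := Nat.div_lt_self (by omega) (by norm_num)
      have := ih (m / 10) hd (by omega)
      omega
    · omega

theorem pvSumDigits_mod9 (m : Nat) : pvSumDigits m % 9 = m % 9 := by
  induction m using Nat.strong_induction_on with
  | _ m ih =>
    rw [pvSumDigits_eq]
    by_cases h : m = 0
    · simp [h]
    · have hd : m / 10 < m := Nat.div_lt_self (Nat.pos_of_ne_zero h) (by norm_num)
      have := ih (m / 10) hd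
      simp only [h, if_false]
      omega

-- int(i) of a single digit character
theorem pv_ofChars_digitChar (k : Nat) (hk : k < 10) :
    (PySem.Int.ofChars? [Nat.digitChar k]).getD 0 = (k : Int) := by
  interval_cases k <;> decide

theorem pv_toDigitsCore_sum (f : Nat) :
    ∀ (m : Nat) (l : List Char), m < f →
      ((Nat.toDigitsCore 10 f m l).map (fun c => (PySem.Int.ofChars? [c]).getD 0)).sum
        = (pvSumDigits m : Int) + (l.map (fun c => (PySem.Int.ofChars? [c]).getD 0)).sum := by
  induction f with
  | zero => intro m l h; omega
  | succ f ih =>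
    intro m l h
    rw [Nat.toDigitsCore]
    by_cases h0 : m / 10 = 0
    · rw [if_pos h0]
      by_cases hm : m = 0
      · subst hm; simp [pvSumDigits, pv_ofChars_digitChar 0 (by norm_num)]
      · have hs : pvSumDigits m = m % 10 + pvSumDigits (m / 10) := by
          rw [pvSumDigits_eq, if_neg hm]
        rw [hs, h0]
        simp [pvSumDigits, pv_ofChars_digitChar (m % 10) (Nat.mod_lt m (by norm_num))]
    · rw [if_neg h0]
      have hm : 10 ≤ m := by omega
      have hrec : m / 10 < f := by
        have : m / 10 < m := Nat.div_lt_self (by omega) (by norm_num)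
        omega
      rw [ih (m / 10) (Nat.digitChar (m % 10) :: l) hrec]
      have hs : pvSumDigits m = m % 10 + pvSumDigits (m / 10) := by
        rw [pvSumDigits_eq, if_neg (show ¬ m = 0 by omega)]
      rw [hs]
      simp [pv_ofChars_digitChar (m % 10) (Nat.mod_lt m (by norm_num))]
      ring

theorem pvDigitSumStep_eq (m : Int) (h : 9 < m) :
    pvDigitSumStep m = (pvSumDigits m.toNat : Int) := by
  unfold pvDigitSumStep
  rw [show PySem.Int.toChars m = Nat.toDigits 10 m.toNat by
    simp [PySem.Int.toChars, show ¬ m < 0 by omega]]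
  rw [Nat.toDigits]
  rw [pv_toDigitsCore_sum (m.toNat + 1) m.toNat [] (by omega)]
  simp

theorem pvDigitSumLoop_eq (f : Nat) :
    ∀ (m : Int), 1 ≤ m → m.toNat ≤ f →
      pvDigitSumLoop f m = 1 + PySem.Int.mod (m - 1) 9 := by
  induction f with
  | zero => intro m h1 h2; omega
  | succ f ih =>
    intro m h1 h2
    rw [pvDigitSumLoop]
    by_cases h9 : m > 9
    · simp only [h9, if_pos]
      rw [pvDigitSumStep_eq m h9]
      have hmod := pvSumDigits_mod9 m.toNat
      have hlt := pvSumDigits_lt m.toNat (by omega)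
      have hpos := pvSumDigits_pos m.toNat (by omega)
      rw [ih (pvSumDigits m.toNat : Int) (by omega) (by omega)]
      rw [PySem.Int.mod_eq_emod_of_pos (by norm_num : (0:Int) < 9),
          PySem.Int.mod_eq_emod_of_pos (by norm_num : (0:Int) < 9)]
      omega
    · rw [if_neg h9]
      rw [PySem.Int.mod_eq_emod_of_pos (by norm_num : (0:Int) < 9)]
      omega

theorem pvDigitSum_eq (n : Int) :
    pvDigitSum n
      = (decide (1 ≤ n) &&
          (let dr := 1 + PySem.Int.mod (n - 1) 9
           dr == 1 || dr == 4 || dr == 7 || dr == 9)) := by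
  by_cases h1 : 1 ≤ n
  · rw [pvDigitSum]
    rw [pvDigitSumLoop_eq n.toNat n h1 (le_refl _)]
    simp [h1]
  · have hr : pvDigitSumLoop n.toNat n = n := by
      have : n.toNat = 0 := by omega
      rw [this, pvDigitSumLoop]
    rw [pvDigitSum]
    rw [hr]
    have : ¬ (n = 1 ∨ n = 4 ∨ n = 7 ∨ n = 9) := by omega
    simp [h1]
    omega

theorem pvSetInterection_eq (s : String) :
    pvSetInterection s = s.toList.any (fun c => ['1', '4', '5', '6', '9'].contains c) := by
  rw [Bool.eq_iff_iff]
  unfold pvSetInterection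
  rw [Bool.not_eq_eq_eq_not, Bool.not_true, List.isEmpty_eq_false_iff_exists_mem]
  constructor
  · rintro ⟨c, hc⟩
    rw [PySem.Set.mem_inter] at hc
    rw [PySem.Set.mem_ofList, PySem.Set.mem_ofList] at hc
    simp only [List.any_eq_true, List.contains_eq_mem, decide_eq_true_eq]
    exact ⟨c, hc.2, hc.1⟩
  · intro h
    simp only [List.any_eq_true, List.contains_eq_mem, decide_eq_true_eq] at h
    obtain ⟨c, hcs, hcl⟩ := h
    exact ⟨c, by rw [PySem.Set.mem_inter, PySem.Set.mem_ofList, PySem.Set.mem_ofList]; exact ⟨hcl, hcs⟩⟩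

theorem pvMod34_eq (n : Int) :
    pvMod34 n = (decide (PySem.Int.mod n 3 < 2) || decide (PySem.Int.mod n 4 < 2)) := by
  have h3a := PySem.Int.mod_nonneg n (by norm_num : (0:Int) < 3)
  have h3b := PySem.Int.mod_lt n (by norm_num : (0:Int) < 3)
  have h4a := PySem.Int.mod_nonneg n (by norm_num : (0:Int) < 4)
  have h4b := PySem.Int.mod_lt n (by norm_num : (0:Int) < 4)
  rw [Bool.eq_iff_iff]
  unfold pvMod34
  simp only [Bool.or_eq_true, beq_iff_eq, decide_eq_true_eq]
  omega

-- ===== VERDICT (by name: the statement is the Claim_ definition above) =====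
theorem is_possible_square_spec : Claim_equal_is_possible_square := by
  intro n _
  show is_possible_square n = is_possible_square_alt n
  rw [is_possible_square, is_possible_square_alt,
      pvSetInterection_eq, pvDigitSum_eq, pvMod34_eq]
  cases ((PySem.Int.toStr n).toList.any (fun c => ['1', '4', '5', '6', '9'].contains c)) <;>
    cases (decide (1 ≤ n) &&
      (let dr := 1 + PySem.Int.mod (n - 1) 9
       dr == 1 || dr == 4 || dr == 7 || dr == 9)) <;> simp
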